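-- pv_equiv track=rewrite | github.com/grannypuppy/CodeDllm | train/rl_dream_train_multitask_margin.py | collapse_k_unique
-- ===== SOURCE A (Python) =====
-- def collapse_k_unique(lst, k: int):
--     if k <= 1:
--         return lst
--     uniq = sorted(set(lst))
--     if not uniq:
--         return lst
--     groups = (len(uniq) + k - 1) // k
--     mapping = {}
--     for g in range(groups):
--         st = g * k
--         ed = min((g + 1) * k - 1, len(uniq) - 1)
--         rep = uniq[ed]
--         for val in uniq[st: ed + 1]:
--             mapping[val] = rep
--     return [mapping[x] for x in lst]
-- ===== SOURCE B (Python) =====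
-- def _bisect_left(a, x):
--     # standard binary search: first index at which x could be inserted keeping order
--     lo, hi = 0, len(a)
--     while lo < hi:
--         mid = (lo + hi) // 2
--         if a[mid] < x:
--             lo = mid + 1
--         else:
--             hi = mid
--     return lo
--
--
-- def collapse_k_unique(lst, k: int):
--     if k <= 1:
--         return lst
--     uniq = sorted(set(lst))
--     if not uniq:
--         return lst
--     return [uniq[min(_bisect_left(uniq, x) // k * k + k - 1, len(uniq) - 1)]
--             for x in lst]
-- ===== Notes on version B (the rewrite author's own statement) =====
-- stated objective: alternative
-- what changed: Replaces the materialized value->representative dict (built by a nested loop over groups and slices) with a per-element binary search on the sorted unique values: each output is computed on the fly as uniq[min(pos//k*k + k-1, len(uniq)-1)].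
import Mathlib
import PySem

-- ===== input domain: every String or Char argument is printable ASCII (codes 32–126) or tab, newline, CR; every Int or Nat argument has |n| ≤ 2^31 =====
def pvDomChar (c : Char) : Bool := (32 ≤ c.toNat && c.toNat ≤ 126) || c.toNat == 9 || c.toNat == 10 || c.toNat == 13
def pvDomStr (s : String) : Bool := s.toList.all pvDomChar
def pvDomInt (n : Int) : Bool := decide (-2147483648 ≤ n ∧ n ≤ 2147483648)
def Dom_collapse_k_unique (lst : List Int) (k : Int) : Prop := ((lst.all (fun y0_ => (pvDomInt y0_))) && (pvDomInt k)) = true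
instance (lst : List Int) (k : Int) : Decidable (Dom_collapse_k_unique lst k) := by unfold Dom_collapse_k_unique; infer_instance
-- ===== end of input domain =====

-- B replaces A's materialized value->representative dict with a per-element binary search
-- on the sorted unique values (objective: alternative decomposition, same cost class).


-- ===== PORT A =====
def collapse_k_unique (lst : List Int) (k : Int) : List Int :=
  if k ≤ 1 then lst
  else
    let uniq := PySem.List.sorted (PySem.Set.ofList lst) (fun x => x)
    if uniq = [] then lst
    else
      let groups := PySem.Int.floordiv ((uniq.length : Int) + k - 1) k
      let mapping :=
        (PySem.List.pyRange 0 groups).foldl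
          (fun m g =>
            let st := g * k
            let ed := min ((g + 1) * k - 1) ((uniq.length : Int) - 1)
            -- exact: ed is a valid index for every g in range(groups), so uniq[ed] never raises
            let rep := PySem.List.pyGetD uniq ed 0
            (PySem.List.slice uniq (some st) (some (ed + 1))).foldl
              (fun m val => m.insert val rep) m)
          PySem.Dict.empty
      -- exact: every x in lst is a key of mapping, so mapping[x] never raises KeyError
      lst.map (fun x => (mapping.get? x).getD 0)

-- ===== PORT B =====
-- Source B's hand-written _bisect_left is the standard binary search = PySem.List.bisectLeft
def collapse_k_unique_alt (lst : List Int) (k : Int) : List Int :=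
  if k ≤ 1 then lst
  else
    let uniq := PySem.List.sorted (PySem.Set.ofList lst) (fun x => x)
    if uniq = [] then lst
    else
      lst.map (fun x =>
        let idx := min (PySem.Int.floordiv (PySem.List.bisectLeft uniq x : Int) k * k + k - 1)
                       ((uniq.length : Int) - 1)
        -- exact: idx is always a valid index, so uniq[idx] never raises
        PySem.List.pyGetD uniq idx 0)

-- ===== PRECONDITION & SPEC =====
def Spec_collapse_k_unique (lst : List Int) (k : Int) (out : List Int) : Prop := out = collapse_k_unique_alt lst k
instance (lst : List Int) (k : Int) (out : List Int) : Decidable (Spec_collapse_k_unique lst k out) := by unfold Spec_collapse_k_unique; infer_instance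

-- ===== CLAIM (what is proved, stated in full; the proofs are below) =====
def Claim_equal_collapse_k_unique : Prop := ∀ (lst : List Int) (k : Int), Dom_collapse_k_unique lst k → Spec_collapse_k_unique lst k (collapse_k_unique lst k)

-- ===== LEMMAS AND PROOFS =====

-- lookup after a fold of inserts with a constant value
lemma get?_foldl_insert_const (L : List Int) (m : PySem.Dict Int Int) (rep x : Int) :
    (L.foldl (fun m v => m.insert v rep) m).get? x
      = if x ∈ L then some rep else m.get? x := by
  induction L generalizing m with
  | nil => simp
  | cons a t ih =>
    simp only [List.foldl_cons, ih, List.mem_cons]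
    by_cases hx : x ∈ t
    · simp [hx]
    · by_cases hxa : x = a
      · subst hxa; simp [hx, PySem.Dict.get?_insert_self]
      · simp [hx, hxa, PySem.Dict.get?_insert_of_ne _ _ hxa]

-- membership of l[i] in a contiguous slice of a Nodup list
lemma getElem_mem_drop_take_iff (l : List Int) (hnd : l.Nodup) (i a b : Nat) (hi : i < l.length) :
    l[i] ∈ (l.drop a).take b ↔ a ≤ i ∧ i < a + b := by
  rw [List.mem_iff_getElem]
  constructor
  · rintro ⟨t, ht, hEq⟩
    have htlen : t < b ∧ a + t < l.length := by
      simp [List.length_take, List.length_drop] at ht; omega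
    rw [List.getElem_take, List.getElem_drop] at hEq
    have := (List.Nodup.getElem_inj_iff hnd).mp hEq
    omega
  · rintro ⟨h1, h2⟩
    refine ⟨i - a, by simp [List.length_take, List.length_drop]; omega, ?_⟩
    rw [List.getElem_take, List.getElem_drop]
    congr 1; omega

-- Source B's binary search finds the index of l[i] in a strictly increasing list
lemma bisectLeft_getElem (l : List Int) (hinc : l.Pairwise (· < ·)) (i : Nat) (hi : i < l.length) :
    PySem.List.bisectLeft l l[i] = i := by
  have hle : l.Pairwise (· ≤ ·) := hinc.imp (fun h => le_of_lt h)
  obtain ⟨hlen, h1, h2⟩ := PySem.List.bisectLeft_spec l l[i] hle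
  set r := PySem.List.bisectLeft l l[i] with hr
  rcases lt_trichotomy r i with h | h | h
  · have := h2 r (by omega) le_rfl
    have hlt := List.pairwise_iff_getElem.mp hinc r i (by omega) hi h
    omega
  · exact h
  · have := h1 i hi h
    omega

-- characterization of A's mapping after g groups have been processed
lemma mapping_char (uniq : List Int) (k : Int) (hk : 2 ≤ k)
    (hinc : uniq.Pairwise (· < ·)) (g : Nat)
    (hg : (g : Int) * k ≤ (uniq.length : Int) + k - 1)
    (i : Nat) (hi : i < uniq.length) :
    ((PySem.List.pyRange 0 (g : Int)).foldl
        (fun m gg =>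
          let st := gg * k
          let ed := min ((gg + 1) * k - 1) ((uniq.length : Int) - 1)
          let rep := PySem.List.pyGetD uniq ed 0
          (PySem.List.slice uniq (some st) (some (ed + 1))).foldl
            (fun m val => m.insert val rep) m)
        PySem.Dict.empty).get? uniq[i]
      = if (i : Int) < (g : Int) * k then
          some (PySem.List.pyGetD uniq
            (min (PySem.Int.floordiv (i : Int) k * k + k - 1) ((uniq.length : Int) - 1)) 0)
        else none := by
  have hnd : uniq.Nodup := hinc.imp (fun h => ne_of_lt h)
  induction g with
  | zero =>
    rw [PySem.List.pyRange_one_eq_nil (by norm_num)]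
    simp only [List.foldl_nil, Nat.cast_zero, zero_mul]
    rw [if_neg (by omega)]
    rfl
  | succ g ih =>
    have hring : ((g : Int) + 1) * k = (g : Int) * k + k := by ring
    have hg' : (g : Int) * k ≤ (uniq.length : Int) + k - 1 := by
      push_cast at hg; rw [hring] at hg; omega
    have hcast : ((g + 1 : Nat) : Int) = (g : Int) + 1 := by push_cast; ring
    rw [hcast, PySem.List.pyRange_one_succ_right (by positivity), List.foldl_append]
    simp only [List.foldl_cons, List.foldl_nil]
    rw [hring]
    set n : Int := (uniq.length : Int) with hn
    have hni : (i : Int) < n := by rw [hn]; exact_mod_cast hi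
    have hn1 : 1 ≤ n := by omega
    have hst0 : (0:Int) ≤ (g : Int) * k := by positivity
    have hed0 : (0:Int) ≤ min ((g:Int) * k + k - 1) (n - 1) + 1 := by omega
    rw [get?_foldl_insert_const, PySem.List.slice_toNat _ hst0 hed0]
    simp only [getElem_mem_drop_take_iff uniq hnd i _ _ hi]
    by_cases hmem : ((g:Int) * k).toNat ≤ i ∧
        i < ((g:Int) * k).toNat + ((min ((g:Int) * k + k - 1) (n - 1) + 1).toNat - ((g:Int) * k).toNat)
    · -- i is in group g: the fresh insert supplies its representative
      have hdiv : PySem.Int.floordiv (i : Int) k = (g:Int) := by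
        rw [PySem.Int.floordiv_eq_iff_of_pos (by omega), hring]
        constructor <;> omega
      rw [if_pos hmem, if_pos (by omega), hdiv]
    · -- i is outside group g: lookup falls through to the previous groups
      rw [if_neg hmem, ih hg']
      by_cases hlt : (i : Int) < (g:Int) * k
      · rw [if_pos hlt, if_pos (by omega)]
      · rw [if_neg hlt, if_neg (by omega)]

-- ===== VERDICT (by name: the statement is the Claim_ definition above) =====
theorem collapse_k_unique_spec : Claim_equal_collapse_k_unique := by
  unfold Claim_equal_collapse_k_unique Spec_collapse_k_unique
  intro lst k _
  unfold collapse_k_unique collapse_k_unique_alt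
  by_cases hk : k ≤ 1
  · simp only [if_pos hk]
  · simp only [if_neg hk]
    by_cases hnil : PySem.List.sorted (PySem.Set.ofList lst) (fun x => x) = []
    · simp only [if_pos hnil]
    · simp only [if_neg hnil]
      apply List.map_congr_left
      intro x hx
      set uniq := PySem.List.sorted (PySem.Set.ofList lst) (fun x => x) with hu
      have hinc : uniq.Pairwise (· < ·) := PySem.List.sorted_ofList_pairwise_lt lst
      have hxu : x ∈ uniq := by
        rw [hu, PySem.List.mem_sorted, PySem.Set.mem_ofList]; exact hx
      obtain ⟨i, hi, hix⟩ := List.mem_iff_getElem.mp hxu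
      subst hix
      set n : Int := (uniq.length : Int) with hn
      have hn1 : 1 ≤ n := by
        rw [hn]; exact_mod_cast List.length_pos_iff.mpr hnil
      have hk2 : 2 ≤ k := by omega
      set G : Int := PySem.Int.floordiv (n + k - 1) k with hG
      have hGspec : G * k ≤ n + k - 1 ∧ n + k - 1 < (G + 1) * k :=
        (PySem.Int.floordiv_eq_iff_of_pos (by omega)).mp hG.symm
      have hG0 : 0 ≤ G := by nlinarith [hGspec.1, hGspec.2]
      have hGcast : ((G.toNat : Nat) : Int) = G := Int.toNat_of_nonneg hG0
      rw [← hGcast]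
      rw [mapping_char uniq k hk2 hinc G.toNat (by rw [hGcast]; exact hGspec.1) i hi]
      have hiG : (i : Int) < ((G.toNat : Nat) : Int) * k := by
        have hin : (i : Int) < n := by rw [hn]; exact_mod_cast hi
        have : n - 1 < G * k := by nlinarith [hGspec.2]
        rw [hGcast]; omega
      rw [if_pos hiG, bisectLeft_getElem uniq hinc i hi]
      rfl
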